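-- pv_equiv track=rewrite | github.com/arturchichorro/AdventOfCode | 22/22-2.py | most_bananas
-- ===== SOURCE A (Python) =====
-- def mix(number, value):
--     return number ^ value
--
-- def prune(number):
--     return number % 16777216
--
-- def get_next_secret(number):
--     number = prune(mix(number * 64, number))
--     number = prune(mix(number // 32, number))
--     number = prune(mix(number * 2048, number))
--     return number
--
-- def parse_input(input):
--     return list(map(int, input.strip().split("\n")))
--
-- def most_bananas(input):
--
--     secrets = parse_input(input)
--     ranges = {}
--
--     for secret in secrets:
--
--         copy = secret
--         visited = set()
--         changes = []
--
--         for _ in range(2000):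
--             next_secret = get_next_secret(copy)
--             changes.append((next_secret % 10) - (copy % 10))
--             copy = next_secret
--
--             if len(changes) == 4:
--                 key = ",".join(map(str, changes))
--                 if key not in visited:
--                     if key not in ranges:
--                         ranges[key] = []
--                     ranges[key].append(next_secret % 10)
--                     visited.add(key)
--                 changes.pop(0)
--
--     return max(sum(vals) for vals in ranges.values())
-- ===== SOURCE B (Python) =====
-- def most_bananas(input):
--     secrets = [int(line) for line in input.strip().split("\n")]
--     ranges = {}
--     for secret in secrets:
--         # pass 1: generate all 2001 prices for this buyer
--         prices = []
--         s = secret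
--         for _ in range(2001):
--             prices.append(s % 10)
--             s = (s * 64 ^ s) % 16777216
--             s = (s // 32 ^ s) % 16777216
--             s = (s * 2048 ^ s) % 16777216
--         deltas = [prices[i + 1] - prices[i] for i in range(2000)]
--         # pass 2: slide over delta windows, summing directly per key
--         seen = set()
--         for i in range(len(deltas) - 3):
--             key = ",".join(map(str, deltas[i:i + 4]))
--             if key not in seen:
--                 seen.add(key)
--                 ranges[key] = ranges.get(key, 0) + prices[i + 4]
--     return max(ranges.values())
-- ===== Notes on version B (the rewrite author's own statement) =====
-- stated objective: alternative
-- what changed: B first materialises each buyer's full price and delta arrays, then scans fixed index windows over the delta array accumulating a running sum per key, instead of A's single interleaved loop with a mutable sliding 4-window and per-key lists summed at the end.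
import Mathlib
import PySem

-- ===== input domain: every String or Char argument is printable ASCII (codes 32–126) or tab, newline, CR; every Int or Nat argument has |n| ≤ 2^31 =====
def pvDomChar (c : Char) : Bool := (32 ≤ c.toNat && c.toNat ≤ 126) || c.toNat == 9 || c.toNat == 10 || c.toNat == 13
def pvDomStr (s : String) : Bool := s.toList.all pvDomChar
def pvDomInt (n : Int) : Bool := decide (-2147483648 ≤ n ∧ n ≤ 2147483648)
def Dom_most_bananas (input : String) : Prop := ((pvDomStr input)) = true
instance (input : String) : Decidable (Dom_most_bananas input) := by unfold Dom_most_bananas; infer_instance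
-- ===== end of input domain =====

-- B separates secret-generation from window-scanning (build the price/delta arrays, then scan
-- index windows with a running-sum dict) instead of A's interleaved sliding-window loop with
-- per-key lists summed at the end; an alternative decomposition of the same cost.

-- ===== PORT A =====
def mix (number value : Int) : Int := PySem.Int.bxor number value

def prune (number : Int) : Int := PySem.Int.mod number 16777216

def get_next_secret (number : Int) : Int :=
  let number1 := prune (mix (number * 64) number)
  let number2 := prune (mix (PySem.Int.floordiv number1 32) number1)
  prune (mix (number2 * 2048) number2)

-- int(line) may raise ValueError: `none` marks that (excluded by Pre_)
def parse_input (input : String) : Option (List Int) :=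
  -- "\n" ≠ "" so split? is always `some`
  ((PySem.Str.split? (PySem.Str.strip input) "\n").getD []).mapM PySem.Int.ofStr?

-- the `if key not in visited:` block of A's inner loop
def updA (st : PySem.Set String × PySem.Dict String (List Int)) (key : String) (price : Int) :
    PySem.Set String × PySem.Dict String (List Int) :=
  if PySem.Set.contains st.1 key then st
  else
    let ranges := if st.2.contains key then st.2 else st.2.insert key []
    (PySem.Set.add st.1 key, ranges.insert key (ranges.getD key [] ++ [price]))

-- one iteration of A's `for _ in range(2000)` body; state = (copy, visited, changes, ranges)
def aStep (st : Int × PySem.Set String × List Int × PySem.Dict String (List Int)) :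
    Int × PySem.Set String × List Int × PySem.Dict String (List Int) :=
  let copy := st.1
  let next_secret := get_next_secret copy
  let changes := st.2.2.1 ++ [PySem.Int.mod next_secret 10 - PySem.Int.mod copy 10]
  if changes.length == 4 then
    let key := PySem.Str.join "," (changes.map PySem.Int.toStr)
    let vr := updA (st.2.1, st.2.2.2) key (PySem.Int.mod next_secret 10)
    -- changes.pop(0): the list has length 4 here, so pop? returns `some`
    let changes := ((PySem.List.pop? changes 0).map (·.2)).getD changes
    (next_secret, vr.1, changes, vr.2)
  else (next_secret, st.2.1, changes, st.2.2.2)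

def most_bananas (input : String) : Int :=
  match parse_input input with
  | none => 0  -- Python raises ValueError here; excluded by Pre_
  | some secrets =>
    let ranges := secrets.foldl (fun ranges secret =>
      ((PySem.List.pyRange 0 2000 1).foldl (fun st _ => aStep st)
        (secret, (PySem.Set.empty : PySem.Set String), ([] : List Int), ranges)).2.2.2)
      PySem.Dict.empty
    match PySem.List.max? (ranges.values.map (fun vals => vals.sum)) (fun x => x) with
    | some m => m
    | none => 0  -- max() on an empty dict raises ValueError; excluded by Pre_

-- ===== PORT B =====
-- the `if key not in seen:` block of B's window scan
def updB (st : PySem.Set String × PySem.Dict String Int) (key : String) (price : Int) :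
    PySem.Set String × PySem.Dict String Int :=
  if PySem.Set.contains st.1 key then st
  else (PySem.Set.add st.1 key, st.2.insert key (st.2.getD key 0 + price))

-- one iteration of B's price-generation loop; state = (prices, s)
def bGen (st : List Int × Int) : List Int × Int :=
  let prices := st.1 ++ [PySem.Int.mod st.2 10]
  let s := PySem.Int.mod (PySem.Int.bxor (st.2 * 64) st.2) 16777216
  let s := PySem.Int.mod (PySem.Int.bxor (PySem.Int.floordiv s 32) s) 16777216
  let s := PySem.Int.mod (PySem.Int.bxor (s * 2048) s) 16777216
  (prices, s)

def most_bananas_alt (input : String) : Int :=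
  match ((PySem.Str.split? (PySem.Str.strip input) "\n").getD []).mapM PySem.Int.ofStr? with
  | none => 0  -- int(line) raised; excluded by Pre_
  | some secrets =>
    let ranges := secrets.foldl (fun ranges secret =>
      let prices := ((PySem.List.pyRange 0 2001 1).foldl (fun st _ => bGen st)
        (([] : List Int), secret)).1
      let deltas := (PySem.List.pyRange 0 2000 1).map (fun i =>
        PySem.List.pyGetD prices (i + 1) 0 - PySem.List.pyGetD prices i 0)
      ((PySem.List.pyRange 0 (PySem.List.len deltas - 3) 1).foldl (fun st i =>
          updB st
            (PySem.Str.join "," ((PySem.List.slice deltas (some i) (some (i + 4))).map PySem.Int.toStr))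
            (PySem.List.pyGetD prices (i + 4) 0))
        ((PySem.Set.empty : PySem.Set String), ranges)).2)
      PySem.Dict.empty
    match PySem.List.max? ranges.values (fun x => x) with
    | some m => m
    | none => 0  -- max() on an empty dict raises ValueError; excluded by Pre_

-- ===== PRECONDITION & SPEC =====
-- Pre_ excludes exactly the inputs where int(line) raises ValueError (a non-integer line).
def Pre_most_bananas (input : String) : Prop :=
  ∀ line ∈ (PySem.Str.split? (PySem.Str.strip input) "\n").getD [],
    (PySem.Int.ofStr? line).isSome = true
instance (input : String) : Decidable (Pre_most_bananas input) := by
  unfold Pre_most_bananas; infer_instance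

def pvWitness_most_bananas : String := "1\n2"

def Spec_most_bananas (input : String) (out : Int) : Prop := out = most_bananas_alt input
instance (input : String) (out : Int) : Decidable (Spec_most_bananas input out) := by
  unfold Spec_most_bananas; infer_instance

-- ===== CLAIM (what is proved, stated in full; the proofs are below) =====
def Claim_equal_most_bananas : Prop :=
  ∀ (input : String), Dom_most_bananas input → Pre_most_bananas input →
    Spec_most_bananas input (most_bananas input)

-- ===== LEMMAS AND PROOFS =====

-- the secret after n steps, the n-th price and delta, the (key, price) event of window i
def iterN (s : Int) (n : Nat) : Int := get_next_secret^[n] s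
def priceAt (s : Int) (n : Nat) : Int := PySem.Int.mod (iterN s n) 10
def deltaAt (s : Int) (n : Nat) : Int := priceAt s (n + 1) - priceAt s n
def keyAt (s : Int) (i : Nat) : String :=
  PySem.Str.join ","
    ([deltaAt s i, deltaAt s (i + 1), deltaAt s (i + 2), deltaAt s (i + 3)].map PySem.Int.toStr)
-- B's running-sum dict, expressed in terms of A's dict of per-key lists
def mapSum (R : PySem.Dict String (List Int)) : PySem.Dict String Int :=
  PySem.Dict.mk (R.items.map (fun p => (p.1, p.2.sum)))

lemma foldl_skip {α β : Type} (f : α → α) (l : List β) (st : α) :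
    l.foldl (fun st _ => f st) st = f^[l.length] st := by
  induction l generalizing st with
  | nil => rfl
  | cons x xs ih => simp [List.foldl_cons, ih, Function.iterate_succ_apply]

lemma iterN_succ' (s : Int) (n : Nat) : iterN s (n + 1) = get_next_secret (iterN s n) :=
  Function.iterate_succ_apply' _ _ _

lemma contains_mapSum (R : PySem.Dict String (List Int)) (k : String) :
    (mapSum R).contains k = R.contains k := by
  simp only [mapSum, PySem.Dict.contains, List.any_map]
  rfl

lemma get?_mapSum (R : PySem.Dict String (List Int)) (k : String) :
    (mapSum R).get? k = (R.get? k).map List.sum := by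
  simp only [mapSum, PySem.Dict.get?, List.find?_map]
  rw [show ((fun (p : String × Int) => p.1 == k) ∘ fun (p : String × List Int) => (p.1, p.2.sum))
        = (fun (p : String × List Int) => p.1 == k) from rfl]
  cases List.find? (fun p => p.1 == k) R.items <;> rfl

lemma insert_mapSum (R : PySem.Dict String (List Int)) (k : String) (l : List Int) :
    mapSum (R.insert k l) = (mapSum R).insert k l.sum := by
  apply PySem.Dict.ext
  by_cases h : R.contains k = true
  · rw [show (mapSum (R.insert k l)).items = (R.insert k l).items.map (fun p => (p.1, p.2.sum)) from rfl,
      PySem.Dict.items_insert_of_contains R l h,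
      PySem.Dict.items_insert_of_contains (mapSum R) l.sum (by rw [contains_mapSum]; exact h)]
    simp only [mapSum, List.map_map]
    apply List.map_congr_left
    intro p _
    by_cases hp : p.1 = k
    · simp [hp]
    · simp [hp]
  · have h' : R.contains k = false := by simpa using h
    rw [show (mapSum (R.insert k l)).items = (R.insert k l).items.map (fun p => (p.1, p.2.sum)) from rfl,
      PySem.Dict.items_insert_of_not_contains R l h',
      PySem.Dict.items_insert_of_not_contains (mapSum R) l.sum (by rw [contains_mapSum]; exact h')]
    simp [mapSum]

lemma getD_mapSum (R : PySem.Dict String (List Int)) (k : String) :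
    (mapSum R).getD k 0 = (R.getD k []).sum := by
  simp only [PySem.Dict.getD, get?_mapSum]
  cases R.get? k <;> simp

lemma values_mapSum (R : PySem.Dict String (List Int)) :
    (mapSum R).values = R.values.map List.sum := by
  simp only [mapSum, PySem.Dict.values, List.map_map]
  rfl

lemma updTransport (V : PySem.Set String) (R : PySem.Dict String (List Int))
    (k : String) (p : Int) :
    updB (V, mapSum R) k p = ((updA (V, R) k p).1, mapSum (updA (V, R) k p).2) := by
  by_cases hm : k ∈ V
  · simp [updA, updB, hm]
  · by_cases hc : R.contains k = true
    · simp [updA, updB, hm, hc, insert_mapSum, getD_mapSum]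
    · have hc' : R.contains k = false := by simpa using hc
      have hg : R.get? k = none := (PySem.Dict.get?_eq_none_iff_contains R k).mpr hc'
      simp [updA, updB, hm, hc', PySem.Dict.insert_insert_self,
        insert_mapSum, PySem.Dict.getD, get?_mapSum, hg]

lemma foldTransport (ev : List (String × Int)) (V : PySem.Set String)
    (R : PySem.Dict String (List Int)) :
    ev.foldl (fun st e => updB st e.1 e.2) (V, mapSum R)
      = ((ev.foldl (fun st e => updA st e.1 e.2) (V, R)).1,
         mapSum (ev.foldl (fun st e => updA st e.1 e.2) (V, R)).2) := by
  induction ev generalizing V R with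
  | nil => rfl
  | cons e rest ih =>
    simp only [List.foldl_cons, updTransport V R e.1 e.2]
    exact ih _ _

-- ---- A's inner loop ----

lemma aStep_ramp (s : Int) (k : Nat) (V : PySem.Set String) (ch : List Int)
    (R : PySem.Dict String (List Int)) (h : ch.length < 3) :
    aStep (iterN s k, V, ch, R) = (iterN s (k + 1), V, ch ++ [deltaAt s k], R) := by
  have h4 : ((ch ++ [PySem.Int.mod (get_next_secret (iterN s k)) 10
      - PySem.Int.mod (iterN s k) 10]).length == 4) = false := by
    simp; omega
  simp only [aStep, h4, Bool.false_eq_true, if_false]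
  simp [deltaAt, priceAt, iterN_succ']

lemma aStep_steady (s : Int) (k : Nat) (V : PySem.Set String)
    (R : PySem.Dict String (List Int)) :
    aStep (iterN s (k + 3), V, [deltaAt s k, deltaAt s (k + 1), deltaAt s (k + 2)], R)
      = (iterN s (k + 4),
         (updA (V, R) (keyAt s k) (priceAt s (k + 4))).1,
         [deltaAt s (k + 1), deltaAt s (k + 2), deltaAt s (k + 3)],
         (updA (V, R) (keyAt s k) (priceAt s (k + 4))).2) := by
  have hns : get_next_secret (iterN s (k + 3)) = iterN s (k + 4) := (iterN_succ' s (k + 3)).symm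
  simp [aStep, hns, keyAt, priceAt, deltaAt, PySem.List.pop?, PySem.List.pyIdx?,
    PySem.Int.mod_eq_emod_of_pos]

lemma aLoop (s : Int) (m : Nat) : ∀ (k : Nat) (V : PySem.Set String)
    (R : PySem.Dict String (List Int)),
    aStep^[m] (iterN s (k + 3), V, [deltaAt s k, deltaAt s (k + 1), deltaAt s (k + 2)], R)
      = (iterN s (k + 3 + m),
         (((List.range m).map (fun j => (keyAt s (k + j), priceAt s (k + j + 4)))).foldl
            (fun st e => updA st e.1 e.2) (V, R)).1,
         [deltaAt s (k + m), deltaAt s (k + m + 1), deltaAt s (k + m + 2)],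
         (((List.range m).map (fun j => (keyAt s (k + j), priceAt s (k + j + 4)))).foldl
            (fun st e => updA st e.1 e.2) (V, R)).2) := by
  induction m with
  | zero => intro k V R; simp
  | succ m ih =>
    intro k V R
    rw [Function.iterate_succ_apply, aStep_steady, ih (k + 1)]
    have e1 : k + 3 + (m + 1) = k + 1 + 3 + m := by omega
    have e2 : ∀ j, k + (j + 1) = k + 1 + j := by omega
    have e3 : k + (m + 1) = k + 1 + m := by omega
    rw [e1, e3, List.range_succ_eq_map, List.map_cons, List.foldl_cons, List.map_map]
    have e4 : (fun (x : Nat) => ((fun j => (keyAt s (k + j), priceAt s (k + j + 4))) (Nat.succ x)))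
        = (fun (j : Nat) => (keyAt s (k + 1 + j), priceAt s (k + 1 + j + 4))) := by
      funext j
      show (keyAt s (k + (j + 1)), priceAt s (k + (j + 1) + 4)) = _
      rw [e2 j]
    rw [Function.comp_def, e4, Nat.add_zero]
    rfl

lemma aBuyer (s : Int) (V : PySem.Set String) (R : PySem.Dict String (List Int)) :
    aStep^[2000] (s, V, ([] : List Int), R)
      = (iterN s (3 + 1997),
         (((List.range 1997).map (fun i => (keyAt s i, priceAt s (i + 4)))).foldl
            (fun st e => updA st e.1 e.2) (V, R)).1,
         [deltaAt s 1997, deltaAt s (1997 + 1), deltaAt s (1997 + 2)],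
         (((List.range 1997).map (fun i => (keyAt s i, priceAt s (i + 4)))).foldl
            (fun st e => updA st e.1 e.2) (V, R)).2) := by
  have h3 : aStep^[3] (s, V, ([] : List Int), R)
      = (iterN s 3, V, [deltaAt s 0, deltaAt s 1, deltaAt s 2], R) := by
    have i0 : (s, V, ([] : List Int), R) = (iterN s 0, V, ([] : List Int), R) := rfl
    rw [show (3 : Nat) = 2 + 1 from rfl, Function.iterate_succ_apply, i0,
      aStep_ramp s 0 V [] R (by simp),
      show (2 : Nat) = 1 + 1 from rfl, Function.iterate_succ_apply,
      aStep_ramp s 1 V _ R (by simp),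
      Function.iterate_one,
      aStep_ramp s 2 V _ R (by simp)]
    rfl
  have hl := aLoop s 1997 0 V R
  simp only [Nat.zero_add] at hl
  rw [show (2000 : Nat) = 1997 + 3 from rfl, Function.iterate_add_apply, h3]
  exact hl

-- ---- B's per-buyer passes ----

lemma bGen_eq (st : List Int × Int) :
    bGen st = (st.1 ++ [PySem.Int.mod st.2 10], get_next_secret st.2) := rfl

lemma bGenIter (n : Nat) : ∀ (acc : List Int) (s : Int),
    bGen^[n] (acc, s) = (acc ++ (List.range n).map (fun k => priceAt s k), iterN s n) := by
  induction n with
  | zero => intro acc s; simp [iterN]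
  | succ n ih =>
    intro acc s
    have hp : ∀ k, priceAt (get_next_secret s) k = priceAt s (k + 1) := by
      intro k
      simp only [priceAt, iterN, Function.iterate_succ_apply]
    have hi : iterN (get_next_secret s) n = iterN s (n + 1) := by
      simp only [iterN, Function.iterate_succ_apply]
    rw [Function.iterate_succ_apply, bGen_eq, ih, hi, List.range_succ_eq_map]
    simp only [List.map_cons, List.map_map, Function.comp_def, Nat.succ_eq_add_one, hp]
    have : priceAt s 0 = PySem.Int.mod s 10 := rfl
    simp [this]

lemma window4 (f : Nat → Int) (n j : Nat) (h : j + 4 ≤ n) :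
    (((List.range n).map f).drop j).take 4 = [f j, f (j + 1), f (j + 2), f (j + 3)] := by
  apply List.ext_getElem
  · simp; omega
  · intro i h1 h2
    simp only [List.getElem_take, List.getElem_drop, List.getElem_map, List.getElem_range]
    obtain ⟨h4, -⟩ : i < 4 ∧ i < n - j := by simpa using h1
    interval_cases i <;> simp

lemma bScan (s : Int) (V : PySem.Set String) (R' : PySem.Dict String Int) :
    (PySem.List.pyRange 0 1997 1).foldl (fun st i =>
        updB st
          (PySem.Str.join ","
            ((PySem.List.slice ((List.range 2000).map (deltaAt s)) (some i) (some (i + 4))).map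
              PySem.Int.toStr))
          (PySem.List.pyGetD ((List.range 2001).map (priceAt s)) (i + 4) 0))
      (V, R')
      = ((List.range 1997).map (fun i => (keyAt s i, priceAt s (i + 4)))).foldl
          (fun st e => updB st e.1 e.2) (V, R') := by
  have hr : PySem.List.pyRange 0 1997 1 = (List.range 1997).map (fun k : Nat => (k : Int)) := by
    rw [PySem.List.pyRange_one]
    simp
  rw [hr, List.foldl_map, List.foldl_map]
  apply PySem.List.foldl_congr_mem
  intro st j hj
  have hj' : j < 1997 := List.mem_range.mp hj
  have hkey : PySem.List.slice ((List.range 2000).map (deltaAt s)) (some (j : Int))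
      (some ((j : Int) + 4))
      = [deltaAt s j, deltaAt s (j + 1), deltaAt s (j + 2), deltaAt s (j + 3)] := by
    rw [show ((j : Int) + 4) = ((j : Int) + ((4 : Nat) : Int)) from by norm_num,
      PySem.List.slice_natCast_add]
    exact window4 (deltaAt s) 2000 j (by omega)
  have hprice : PySem.List.pyGetD ((List.range 2001).map (priceAt s)) ((j : Int) + 4) 0
      = priceAt s (j + 4) := by
    rw [show ((j : Int) + 4) = (((j + 4 : Nat)) : Int) from by push_cast; ring,
      PySem.List.pyGetD_natCast]
    exact PySem.List.getD_map_range (priceAt s) 2001 (j + 4) 0 (by omega)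
  rw [hkey, hprice]
  rfl

lemma buyerEq (secret : Int) (R : PySem.Dict String (List Int)) :
    (let prices := ((PySem.List.pyRange 0 2001 1).foldl (fun st _ => bGen st)
        (([] : List Int), secret)).1
     let deltas := (PySem.List.pyRange 0 2000 1).map (fun i =>
        PySem.List.pyGetD prices (i + 1) 0 - PySem.List.pyGetD prices i 0)
     ((PySem.List.pyRange 0 (PySem.List.len deltas - 3) 1).foldl (fun st i =>
          updB st
            (PySem.Str.join "," ((PySem.List.slice deltas (some i) (some (i + 4))).map PySem.Int.toStr))
            (PySem.List.pyGetD prices (i + 4) 0))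
        ((PySem.Set.empty : PySem.Set String), mapSum R)).2)
      = mapSum (((PySem.List.pyRange 0 2000 1).foldl (fun st _ => aStep st)
          (secret, (PySem.Set.empty : PySem.Set String), ([] : List Int), R)).2.2.2) := by
  have hprices : ((PySem.List.pyRange 0 2001 1).foldl (fun st _ => bGen st)
      (([] : List Int), secret)).1 = (List.range 2001).map (priceAt secret) := by
    rw [foldl_skip, PySem.List.length_pyRange_one, show ((2001 : Int) - 0).toNat = 2001 by decide,
      bGenIter]
    simp
  have hdeltas : (PySem.List.pyRange 0 2000 1).map (fun i =>
      PySem.List.pyGetD ((List.range 2001).map (priceAt secret)) (i + 1) 0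
        - PySem.List.pyGetD ((List.range 2001).map (priceAt secret)) i 0)
      = (List.range 2000).map (deltaAt secret) := by
    have hr : PySem.List.pyRange 0 2000 1 = (List.range 2000).map (fun k : Nat => (k : Int)) := by
      rw [PySem.List.pyRange_one]
      simp
    rw [hr, List.map_map]
    apply List.map_congr_left
    intro j hj
    have hj' : j < 2000 := List.mem_range.mp hj
    simp only [Function.comp_def, PySem.List.pyGetD_natCast]
    rw [show ((j : Int) + 1) = (((j + 1 : Nat)) : Int) from by push_cast; ring,
      PySem.List.pyGetD_natCast]
    rw [PySem.List.getD_map_range (priceAt secret) 2001 (j + 1) 0 (by omega),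
      PySem.List.getD_map_range (priceAt secret) 2001 j 0 (by omega)]
    rfl
  have hlen : PySem.List.len ((List.range 2000).map (deltaAt secret)) - 3 = 1997 := by
    simp [PySem.List.len_eq]
  simp only [hprices, hdeltas, hlen]
  rw [bScan, foldTransport, foldl_skip, PySem.List.length_pyRange_one,
    show ((2000 : Int) - 0).toNat = 2000 from by decide]
  obtain ⟨P, hQ⟩ : ∃ P, ((List.range 1997).map (fun i => (keyAt secret i, priceAt secret (i + 4)))).foldl
      (fun st e => updA st e.1 e.2) ((PySem.Set.empty : PySem.Set String), R) = P :=
    ⟨_, rfl⟩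
  rw [hQ]
  have hF : (aStep^[2000] (secret, (PySem.Set.empty : PySem.Set String), ([] : List Int), R)).2.2.2
      = P.2 := by
    rw [aBuyer, hQ]
  rw [hF]

lemma outerFold (secrets : List Int) : ∀ (R : PySem.Dict String (List Int)),
    secrets.foldl (fun ranges secret =>
      let prices := ((PySem.List.pyRange 0 2001 1).foldl (fun st _ => bGen st)
        (([] : List Int), secret)).1
      let deltas := (PySem.List.pyRange 0 2000 1).map (fun i =>
        PySem.List.pyGetD prices (i + 1) 0 - PySem.List.pyGetD prices i 0)
      ((PySem.List.pyRange 0 (PySem.List.len deltas - 3) 1).foldl (fun st i =>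
          updB st
            (PySem.Str.join "," ((PySem.List.slice deltas (some i) (some (i + 4))).map PySem.Int.toStr))
            (PySem.List.pyGetD prices (i + 4) 0))
        ((PySem.Set.empty : PySem.Set String), ranges)).2) (mapSum R)
      = mapSum (secrets.foldl (fun ranges secret =>
          ((PySem.List.pyRange 0 2000 1).foldl (fun st _ => aStep st)
            (secret, (PySem.Set.empty : PySem.Set String), ([] : List Int), ranges)).2.2.2) R) := by
  induction secrets with
  | nil => intro R; rfl
  | cons x xs ih =>
    intro R
    simp only [List.foldl_cons]
    rw [buyerEq x R]
    exact ih _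

-- ===== VERDICT (by name: the statement is the Claim_ definition above) =====
theorem most_bananas_spec : Claim_equal_most_bananas := by
  unfold Claim_equal_most_bananas
  intro input _ _
  unfold Spec_most_bananas most_bananas most_bananas_alt parse_input
  cases h : ((PySem.Str.split? (PySem.Str.strip input) "\n").getD []).mapM PySem.Int.ofStr? with
  | none => rfl
  | some secrets =>
    have hmse : mapSum PySem.Dict.empty = PySem.Dict.empty := rfl
    dsimp only
    rw [← hmse, outerFold secrets PySem.Dict.empty, values_mapSum]
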